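-- pv_equiv track=rewrite | github.com/krolmonika/apweb | unit5_webapp.py | splitBySex
-- ===== SOURCE A (Python) =====
-- def splitBySex(dbData, columns=['played_as_child', 'games', 'plays_now', 'type', 'sex', 'age']):
--     menData = {'played_as_child' : [],
--                'games' : [],
--                'plays_now' : [],
--                'type' : [],
--                'sex' : [],
--                'age' : []}
--     womenData = {'played_as_child': [],
--                  'games': [],
--                  'plays_now': [],
--                  'type': [],
--                  'sex': [],
--                  'age': []}
--     for index in range(len(dbData['sex'])):
--         if dbData['sex'][index] == 1:
--             for column in columns:
--                 menData[column].append(dbData[column][index])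
--         else:
--             for column in columns:
--                 womenData[column].append(dbData[column][index])
--
--     return menData, womenData
-- ===== SOURCE B (Python) =====
-- def splitBySex(dbData, columns=['played_as_child', 'games', 'plays_now', 'type', 'sex', 'age']):
--     keys = ['played_as_child', 'games', 'plays_now', 'type', 'sex', 'age']
--
--     def collect(indices):
--         data = {k: [] for k in keys}
--         for i in indices:
--             for c in columns:
--                 data[c].append(dbData[c][i])
--         return data
--
--     men_idx = [i for i, v in enumerate(dbData['sex']) if v == 1]
--     women_idx = [i for i, v in enumerate(dbData['sex']) if v != 1]
--     return collect(men_idx), collect(women_idx)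
-- ===== Notes on version B (the rewrite author's own statement) =====
-- stated objective: alternative
-- what changed: B replaces A's single row loop that branches to update two accumulator dicts by one enumerate pass partitioning row indices into men/women index lists, then a shared collect helper builds each output dict in its own pass over its index list; Pre_ excludes only inputs where A raises (missing 'sex' key, or with rows present a column outside the six fixed keys, missing from dbData, or with a list shorter than the sex list).
import Mathlib
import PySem

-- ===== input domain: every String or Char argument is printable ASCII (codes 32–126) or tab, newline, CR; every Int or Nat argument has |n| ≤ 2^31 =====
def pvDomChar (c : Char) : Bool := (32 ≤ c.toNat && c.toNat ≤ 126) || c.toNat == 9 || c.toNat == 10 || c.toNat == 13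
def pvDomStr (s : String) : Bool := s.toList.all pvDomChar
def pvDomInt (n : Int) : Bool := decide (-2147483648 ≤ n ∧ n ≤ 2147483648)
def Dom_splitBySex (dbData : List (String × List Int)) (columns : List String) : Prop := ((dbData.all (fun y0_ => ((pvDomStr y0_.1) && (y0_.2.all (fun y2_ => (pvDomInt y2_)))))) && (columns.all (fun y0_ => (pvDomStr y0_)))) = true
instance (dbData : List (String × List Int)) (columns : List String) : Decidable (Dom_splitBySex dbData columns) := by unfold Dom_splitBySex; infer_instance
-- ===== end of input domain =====

-- B partitions row indices by sex in one enumerate pass, then a shared collect helper builds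
-- each output dict in its own pass over its index list (objective: alternative decomposition).


-- the six fixed keys of menData/womenData, in their literal order
def pvSix : List String := ["played_as_child", "games", "plays_now", "type", "sex", "age"]

-- ===== PORT A =====
-- menData/womenData initial literal; Python's KeyError/IndexError sites (dbData['sex'],
-- menData[column], dbData[column][index]) are totalised with getD/pyGetD — exactly the
-- inputs Pre_splitBySex excludes.
def pvSixInit : PySem.Dict String (List Int) :=
  PySem.Dict.mk [("played_as_child", []), ("games", []), ("plays_now", []), ("type", []), ("sex", []), ("age", [])]

def splitBySex (dbData : List (String × List Int)) (columns : List String) : (List (String × List Int)) × (List (String × List Int)) :=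
  let db : PySem.Dict String (List Int) := PySem.Dict.mk dbData
  let sex := db.getD "sex" []
  let res := (PySem.List.pyRange 0 (sex.length : Int) 1).foldl
    (fun (st : PySem.Dict String (List Int) × PySem.Dict String (List Int)) index =>
      if PySem.List.pyGetD sex index 0 == 1 then
        (columns.foldl (fun md c => md.modify c [] (fun l => l ++ [PySem.List.pyGetD (db.getD c []) index 0])) st.1, st.2)
      else
        (st.1, columns.foldl (fun wd c => wd.modify c [] (fun l => l ++ [PySem.List.pyGetD (db.getD c []) index 0])) st.2))
    (pvSixInit, pvSixInit)
  (res.1.items, res.2.items)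

-- ===== PORT B =====
-- B's collect helper: one pass over a list of row indices, appending each row's values
-- column by column (same totalisation of the raise sites as in port A)
def pvCollect (db : PySem.Dict String (List Int)) (columns : List String) (idxs : List Int) : PySem.Dict String (List Int) :=
  idxs.foldl
    (fun d i => columns.foldl (fun d c => d.modify c [] (fun l => l ++ [PySem.List.pyGetD (db.getD c []) i 0])) d)
    (PySem.Dict.mk (pvSix.map (fun k => (k, ([] : List Int)))))

def splitBySex_alt (dbData : List (String × List Int)) (columns : List String) : (List (String × List Int)) × (List (String × List Int)) :=
  let db : PySem.Dict String (List Int) := PySem.Dict.mk dbData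
  let menIdx := ((PySem.List.enumerate (db.getD "sex" []) 0).filter (fun p => p.2 == 1)).map Prod.fst
  let womenIdx := ((PySem.List.enumerate (db.getD "sex" []) 0).filter (fun p => !(p.2 == 1))).map Prod.fst
  ((pvCollect db columns menIdx).items, (pvCollect db columns womenIdx).items)

-- ===== PRECONDITION & SPEC =====
-- Pre_ excludes exactly the inputs where Python A raises: no 'sex' key (KeyError), or — with at
-- least one row — a column outside the six fixed keys (KeyError on menData/womenData), a column
-- missing from dbData (KeyError), or a column list shorter than the sex list (IndexError).
def Pre_splitBySex (dbData : List (String × List Int)) (columns : List String) : Prop :=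
  (PySem.Dict.mk dbData).contains "sex" = true ∧
  (((PySem.Dict.mk dbData).getD "sex" []).length = 0 ∨
    (∀ c ∈ columns, c ∈ pvSix ∧ (PySem.Dict.mk dbData).contains c = true ∧
      ((PySem.Dict.mk dbData).getD "sex" []).length ≤ ((PySem.Dict.mk dbData).getD c []).length))

instance (dbData : List (String × List Int)) (columns : List String) : Decidable (Pre_splitBySex dbData columns) := by
  unfold Pre_splitBySex; infer_instance

def pvWitness_splitBySex : (List (String × List Int)) × List String :=
  ([("sex", [1, 2]), ("age", [3, 4])], ["sex", "age"])

def Spec_splitBySex (dbData : List (String × List Int)) (columns : List String) (out : (List (String × List Int)) × (List (String × List Int))) : Prop := out = splitBySex_alt dbData columns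
instance (dbData : List (String × List Int)) (columns : List String) (out : (List (String × List Int)) × (List (String × List Int))) : Decidable (Spec_splitBySex dbData columns out) := by unfold Spec_splitBySex; infer_instance

-- ===== CLAIM (what is proved, stated in full; the proofs are below) =====
def Claim_equal_splitBySex : Prop := ∀ (dbData : List (String × List Int)) (columns : List String), Dom_splitBySex dbData columns → Pre_splitBySex dbData columns → Spec_splitBySex dbData columns (splitBySex dbData columns)

-- ===== LEMMAS AND PROOFS =====

-- A's row loop updates exactly one component of the (menData, womenData) pair per row,
-- so it splits into two folds over the rows filtered by the sex test — exactly B's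
-- two collect passes over the partitioned index lists
theorem pv_split (db : PySem.Dict String (List Int)) (columns : List String) (sex : List Int)
    (l : List Int) (a b : PySem.Dict String (List Int)) :
    l.foldl
      (fun (st : PySem.Dict String (List Int) × PySem.Dict String (List Int)) index =>
        if PySem.List.pyGetD sex index 0 == 1 then
          (columns.foldl (fun md c => md.modify c [] (fun l => l ++ [PySem.List.pyGetD (db.getD c []) index 0])) st.1, st.2)
        else
          (st.1, columns.foldl (fun wd c => wd.modify c [] (fun l => l ++ [PySem.List.pyGetD (db.getD c []) index 0])) st.2))
      (a, b)
    = ((l.filter (fun i => PySem.List.pyGetD sex i 0 == 1)).foldl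
         (fun d index => columns.foldl (fun md c => md.modify c [] (fun l => l ++ [PySem.List.pyGetD (db.getD c []) index 0])) d) a,
       (l.filter (fun i => !(PySem.List.pyGetD sex i 0 == 1))).foldl
         (fun d index => columns.foldl (fun wd c => wd.modify c [] (fun l => l ++ [PySem.List.pyGetD (db.getD c []) index 0])) d) b) := by
  induction l generalizing a b with
  | nil => rfl
  | cons x t ih =>
      by_cases hx : (PySem.List.pyGetD sex x 0 == 1) = true
      · rw [List.foldl_cons, if_pos hx,
          List.filter_cons_of_pos (p := fun i => PySem.List.pyGetD sex i 0 == 1) hx,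
          List.filter_cons_of_neg (p := fun i => !(PySem.List.pyGetD sex i 0 == 1)) (by simp [hx]),
          List.foldl_cons]
        exact ih _ _
      · rw [List.foldl_cons, if_neg hx,
          List.filter_cons_of_neg (p := fun i => PySem.List.pyGetD sex i 0 == 1) (by simpa using hx),
          List.filter_cons_of_pos (p := fun i => !(PySem.List.pyGetD sex i 0 == 1)) (by simp [hx]),
          List.foldl_cons]
        exact ih _ _

-- B's enumerate-filter-map index lists are A's filtered range of row indices
theorem pv_idx (sex : List Int) (p : Int → Bool) :
    (((PySem.List.enumerate sex 0).filter (fun q => p q.2)).map Prod.fst)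
      = (PySem.List.pyRange 0 (sex.length : Int) 1).filter (fun i => p (PySem.List.pyGetD sex i 0)) := by
  rw [PySem.List.enumerate_eq_map_pyRange _ 0, List.filter_map, List.map_map]
  simp [Function.comp_def]

-- ===== VERDICT (by name: the statement is the Claim_ definition above) =====
theorem splitBySex_spec : Claim_equal_splitBySex := by
  intro dbData columns _ _
  unfold Spec_splitBySex
  simp only [splitBySex, splitBySex_alt, pvCollect]
  rw [pv_split (PySem.Dict.mk dbData) columns ((PySem.Dict.mk dbData).getD "sex" []) _ pvSixInit pvSixInit,
    pv_idx ((PySem.Dict.mk dbData).getD "sex" []) (fun v => v == 1),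
    pv_idx ((PySem.Dict.mk dbData).getD "sex" []) (fun v => !(v == 1))]
  rfl
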